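-- pv_equiv track=rewrite | github.com/inytar/cellular-automaton | twod.py | invert_cell
-- ===== SOURCE A (Python) =====
-- def invert_cell(cell_pos, array):
--     cell_pos = tuple(cell_pos)
--     return tuple(
--         tuple(
--             array[y][x] if (x, y) != cell_pos else ~array[x][y]
--             for x in range(len(array[y]))
--         ) for y in range(len(array))
--     )
-- ===== SOURCE B (Python) =====
-- def invert_cell(cell_pos, array):
--     cx, cy = tuple(cell_pos)
--     if not (0 <= cy < len(array) and 0 <= cx < len(array[cy])):
--         return tuple(tuple(r) for r in array)
--     row = tuple(array[cy])
--     new_row = row[:cx] + (~array[cx][cy],) + row[cx + 1:]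
--     return tuple(tuple(r) for r in array[:cy]) + (new_row,) + tuple(tuple(r) for r in array[cy + 1:])
-- ===== Notes on version B (the rewrite author's own statement) =====
-- stated objective: alternative
-- what changed: A rebuilds the grid cell by cell with a per-element conditional inside nested generators; B never inspects individual cells: it splits the grid and the hit row by slicing and reassembles prefix + inverted transposed cell + suffix by concatenation (no-op for an out-of-range or malformed cell_pos), replacing per-cell Python-level work by C-level slice copies.
import Mathlib
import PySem

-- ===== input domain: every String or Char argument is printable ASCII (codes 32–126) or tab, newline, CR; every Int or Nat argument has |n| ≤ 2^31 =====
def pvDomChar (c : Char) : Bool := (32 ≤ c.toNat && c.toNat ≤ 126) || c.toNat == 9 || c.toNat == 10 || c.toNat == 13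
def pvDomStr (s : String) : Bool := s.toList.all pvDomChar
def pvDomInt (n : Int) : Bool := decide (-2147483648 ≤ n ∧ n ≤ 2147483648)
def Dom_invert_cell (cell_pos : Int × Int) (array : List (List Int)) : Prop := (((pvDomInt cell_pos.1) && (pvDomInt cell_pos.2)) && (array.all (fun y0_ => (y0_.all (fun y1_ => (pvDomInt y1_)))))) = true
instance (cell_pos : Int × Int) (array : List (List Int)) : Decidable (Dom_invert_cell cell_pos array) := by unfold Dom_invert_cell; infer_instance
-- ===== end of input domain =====

-- B replaces A's per-cell conditional rebuild by slicing: it splits the grid and the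
-- hit row and reassembles prefix ++ inverted transposed cell ++ suffix (alternative
-- decomposition; equivalence of the RETURN value is proved).

-- ===== PORT A =====
-- nested generator: for y in range(len(array)), for x in range(len(array[y]));
-- array[x][y] is only reached when (x,y) == cell_pos, Pre_ keeps that access in range
def invert_cell (cell_pos : Int × Int) (array : List (List Int)) : List (List Int) :=
  (List.range array.length).map (fun (y : Nat) =>
    (List.range (array.getD y []).length).map (fun (x : Nat) =>
      if ((x : Int), (y : Int)) ≠ cell_pos then (array.getD y []).getD x 0
      else -((array.getD x []).getD y 0) - 1))

-- ===== PORT B =====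
-- slices row[:cx], row[cx+1:], array[:cy], array[cy+1:] with the guard ensuring the
-- indices nonnegative and in range, where Python slicing is exactly take/drop
def invert_cell_alt (cell_pos : Int × Int) (array : List (List Int)) : List (List Int) :=
  let cx := cell_pos.1
  let cy := cell_pos.2
  if ¬ (0 ≤ cy ∧ cy < (array.length : Int) ∧ 0 ≤ cx ∧ cx < ((array.getD cy.toNat []).length : Int)) then
    array
  else
    let row := array.getD cy.toNat []
    let newRow := row.take cx.toNat ++ [-((array.getD cx.toNat []).getD cy.toNat 0) - 1] ++ row.drop (cx.toNat + 1)
    array.take cy.toNat ++ [newRow] ++ array.drop (cy.toNat + 1)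

-- ===== PRECONDITION & SPEC =====
-- Pre_ excludes exactly the inputs where Python A raises IndexError: cell_pos hits a
-- cell of the grid but the transposed access array[cell_pos.1][cell_pos.2] is out of range.
def Pre_invert_cell (cell_pos : Int × Int) (array : List (List Int)) : Prop :=
  (0 ≤ cell_pos.1 ∧ 0 ≤ cell_pos.2 ∧ cell_pos.2 < (array.length : Int) ∧
     cell_pos.1 < ((array.getD cell_pos.2.toNat []).length : Int)) →
  (cell_pos.1 < (array.length : Int) ∧ cell_pos.2 < ((array.getD cell_pos.1.toNat []).length : Int))
instance (cell_pos : Int × Int) (array : List (List Int)) : Decidable (Pre_invert_cell cell_pos array) := by unfold Pre_invert_cell; infer_instance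
def pvWitness_invert_cell : (Int × Int) × List (List Int) := ((0, 1), [[1, 2], [3, 4]])

def Spec_invert_cell (cell_pos : Int × Int) (array : List (List Int)) (out : List (List Int)) : Prop := out = invert_cell_alt cell_pos array
instance (cell_pos : Int × Int) (array : List (List Int)) (out : List (List Int)) : Decidable (Spec_invert_cell cell_pos array out) := by unfold Spec_invert_cell; infer_instance

-- ===== CLAIM (what is proved, stated in full; the proofs are below) =====
def Claim_equal_invert_cell : Prop := ∀ (cell_pos : Int × Int) (array : List (List Int)), Dom_invert_cell cell_pos array → Pre_invert_cell cell_pos array → Spec_invert_cell cell_pos array (invert_cell cell_pos array)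

-- ===== LEMMAS AND PROOFS =====

-- identity rebuild: mapping getD over range recovers the list
theorem pv_map_range_getD (l : List Int) :
    (List.range l.length).map (fun x => l.getD x 0) = l := by
  apply List.ext_getElem
  · simp
  · intro i h1 h2
    simp [List.getD_eq_getElem?_getD, h2]

-- a row that cell_pos does not hit is rebuilt unchanged by A's inner generator
theorem pv_row_id (cp : Int × Int) (array : List (List Int)) (y : Nat)
    (h : ∀ x, x < (array.getD y []).length → ((x : Int), (y : Int)) ≠ cp) :
    (List.range (array.getD y []).length).map (fun (x : Nat) =>
      if ((x : Int), (y : Int)) ≠ cp then (array.getD y []).getD x 0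
      else -((array.getD x []).getD y 0) - 1) = array.getD y [] := by
  rw [List.map_congr_left (fun x hx => if_pos (h x (List.mem_range.mp hx)))]
  exact pv_map_range_getD _

theorem pv_getD_eq (array : List (List Int)) (y : Nat) (hy : y < array.length) :
    array.getD y [] = array[y] := by
  simp [List.getD_eq_getElem?_getD, hy]

-- B's slice-and-concatenate result rewritten as the corresponding set
theorem pv_alt_set (cp : Int × Int) (array : List (List Int))
    (hg : 0 ≤ cp.2 ∧ cp.2 < (array.length : Int) ∧ 0 ≤ cp.1 ∧
      cp.1 < ((array.getD cp.2.toNat []).length : Int)) :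
    invert_cell_alt cp array =
      array.set cp.2.toNat
        ((array.getD cp.2.toNat []).set cp.1.toNat
          (-((array.getD cp.1.toNat []).getD cp.2.toNat 0) - 1)) := by
  unfold invert_cell_alt
  rw [if_neg (not_not_intro hg)]
  obtain ⟨hcy0, hcy, hcx0, hcx⟩ := hg
  rw [List.set_eq_take_cons_drop _ (by omega), List.set_eq_take_cons_drop _ (by omega)]
  simp

-- ===== VERDICT (by name: the statement is the Claim_ definition above) =====
theorem invert_cell_spec : Claim_equal_invert_cell := by
  intro cp array _ _
  unfold Spec_invert_cell
  by_cases hg : 0 ≤ cp.2 ∧ cp.2 < (array.length : Int) ∧ 0 ≤ cp.1 ∧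
      cp.1 < ((array.getD cp.2.toNat []).length : Int)
  · rw [pv_alt_set cp array hg]
    unfold invert_cell
    obtain ⟨hcy0, hcy, hcx0, hcx⟩ := hg
    apply List.ext_getElem
    · simp
    · intro y hy1 hy2
      simp only [List.length_map, List.length_range] at hy1
      rw [List.getElem_map, List.getElem_range]
      by_cases hyc : y = cp.2.toNat
      · subst hyc
        rw [List.getElem_set_self]
        apply List.ext_getElem
        · simp
        · intro x hx1 hx2
          simp only [List.length_map, List.length_range] at hx1
          rw [List.getElem_map, List.getElem_range, List.getElem_set]
          by_cases hxc : x = cp.1.toNat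
          · subst hxc
            have heq : ((cp.1.toNat : Int), ((cp.2.toNat : Nat) : Int)) = cp := by
              have h1 : (cp.1.toNat : Int) = cp.1 := by omega
              have h2 : ((cp.2.toNat : Nat) : Int) = cp.2 := by omega
              rw [Prod.ext_iff]; exact ⟨h1, h2⟩
            rw [if_neg (not_not_intro heq), if_pos rfl]
          · have hne : ¬ ((x : Int), ((cp.2.toNat : Nat) : Int)) = cp := by
              intro h
              rw [Prod.ext_iff] at h
              apply hxc; omega
            rw [if_pos hne, if_neg (by omega)]
            exact List.getD_eq_getElem _ _ hx1
      · rw [List.getElem_set_ne (by omega)]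
        rw [pv_row_id cp array y ?_, pv_getD_eq array y hy1]
        intro x hx h
        rw [Prod.ext_iff] at h
        obtain ⟨h1, h2⟩ := h
        apply hyc
        omega
  · unfold invert_cell invert_cell_alt
    rw [if_pos hg]
    apply List.ext_getElem
    · simp
    · intro y hy1 hy2
      simp only [List.length_map, List.length_range] at hy1
      rw [List.getElem_map, List.getElem_range]
      rw [pv_row_id cp array y ?_, pv_getD_eq array y hy1]
      intro x hx h
      rw [Prod.ext_iff] at h
      obtain ⟨h1, h2⟩ := h
      apply hg
      have hy2' : cp.2.toNat = y := by omega
      refine ⟨by omega, by omega, by omega, ?_⟩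
      rw [hy2']
      omega
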